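-- pv_equiv track=rewrite | github.com/milana2/ParallelizationForMPC | compiler/compiler/motion_backend/reference_implementations.py | drop_dim
-- ===== SOURCE A (Python) =====
-- def drop_dim(
--     arr: list[int], dims_in_arr: list[int], all_dims: list[int], dim_to_drop: int
-- ) -> list[int]:
--     dropped = [0] * (len(arr) // all_dims[dim_to_drop])
--
--     # Compute the number of elements corresponding to a single slice of this dimension
--     slice_size = 1
--     for dim_idx in reversed(dims_in_arr):
--         if dim_idx == dim_to_drop:
--             break
--         slice_size *= all_dims[dim_idx]
--
--     # skip_size holds how many elements we should skip over (e.g. the intermediate values)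
--     skip_size = slice_size * (all_dims[dim_to_drop] - 1)
--
--     out_idx = 0
--     arr_idx = skip_size
--     while arr_idx < len(arr):
--         for _ in range(slice_size):
--             dropped[out_idx] = arr[arr_idx]
--             out_idx += 1
--             arr_idx += 1
--         # arr_idx is now pointing at the beginning of the dropped dimension's next row
--         arr_idx += skip_size
--
--     return dropped
-- ===== SOURCE B (Python) =====
-- def drop_dim(
--     arr: list[int], dims_in_arr: list[int], all_dims: list[int], dim_to_drop: int
-- ) -> list[int]:
--     # slice_size: product of the dimensions that come after the dropped one
--     # (same reversed-with-break scan as the original; its break semantics matter)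
--     slice_size = 1
--     for dim_idx in reversed(dims_in_arr):
--         if dim_idx == dim_to_drop:
--             break
--         slice_size *= all_dims[dim_idx]
--
--     v = all_dims[dim_to_drop]
--     skip_size = slice_size * (v - 1)
--     block = slice_size * v
--
--     # Closed-form index map: output element i lives at a directly computable
--     # position of arr, so no sequential dual-pointer walk is needed.
--     return [
--         arr[(i // slice_size) * block + skip_size + (i % slice_size)]
--         for i in range(len(arr) // v)
--     ]
-- ===== Notes on version B (the rewrite author's own statement) =====
-- stated objective: alternative
-- what changed: The sequential dual-pointer walk that fills a preallocated zero list is replaced by a closed-form per-element index computation: output element i is read directly at arr[(i//slice_size)*block + skip_size + (i%slice_size)].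
-- outside the precondition, e.g. on drop_dim([7, 8], [1, 1], [2, 5], 0): A returns [0], B raises IndexError
import Mathlib
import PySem

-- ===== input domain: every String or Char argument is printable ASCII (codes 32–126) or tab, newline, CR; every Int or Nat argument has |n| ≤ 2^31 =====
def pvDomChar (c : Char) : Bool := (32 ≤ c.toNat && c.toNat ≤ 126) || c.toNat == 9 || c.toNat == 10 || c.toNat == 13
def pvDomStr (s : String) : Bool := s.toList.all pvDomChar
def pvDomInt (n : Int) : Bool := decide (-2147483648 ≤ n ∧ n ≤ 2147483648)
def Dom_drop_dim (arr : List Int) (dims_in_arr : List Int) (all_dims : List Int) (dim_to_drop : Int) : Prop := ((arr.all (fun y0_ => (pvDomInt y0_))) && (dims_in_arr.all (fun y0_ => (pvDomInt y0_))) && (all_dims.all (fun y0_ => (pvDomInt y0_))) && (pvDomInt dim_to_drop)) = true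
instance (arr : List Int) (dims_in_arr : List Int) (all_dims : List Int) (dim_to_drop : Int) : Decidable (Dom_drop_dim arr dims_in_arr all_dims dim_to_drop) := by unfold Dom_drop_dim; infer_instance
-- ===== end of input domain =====

-- B replaces A's sequential dual-pointer walk over a preallocated zero list by a closed-form
-- per-output-element index computation; equivalence is proved on Pre_ (A's well-shaped domain).

-- ===== PORT A =====

-- the 'slice_size' loop: 'for dim_idx in reversed(dims_in_arr): if dim_idx == dim_to_drop: break; slice_size *= all_dims[dim_idx]'
-- (this very loop appears verbatim in both Pythons, so both ports use it; pyGetD's default 1 stands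
-- for Python's IndexError on an invalid index — unreachable inside Pre_)
def pvSliceLoop (all_dims : List Int) (dim_to_drop : Int) : List Int → Int → Int
  | [], acc => acc
  | di :: rest, acc =>
      if di == dim_to_drop then acc
      else pvSliceLoop all_dims dim_to_drop rest (acc * PySem.List.pyGetD all_dims di 1)

-- inner 'for _ in range(slice_size)': dropped[out_idx] = arr[arr_idx]; out_idx += 1; arr_idx += 1
-- (a none from pyGet? / an out-of-range write is a Python IndexError: unreachable inside Pre_,
-- modelled by stopping with the current state resp. pySetD's no-op)
def pvInnerA (arr : List Int) : Nat → List Int × Int × Int → List Int × Int × Int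
  | 0, st => st
  | c + 1, (d, oi, ai) =>
      match PySem.List.pyGet? arr ai with
      | none => (d, oi, ai)
      | some x => pvInnerA arr c (PySem.List.pySetD d oi x, oi + 1, ai + 1)

-- the 'while arr_idx < len(arr)' loop; fuel bounds the iteration count (the loop diverges on some
-- inputs outside Pre_; inside Pre_ the fuel arr.length + 2 is never exhausted)
def pvWhileA (arr : List Int) (ss skip : Int) : Nat → List Int → Int → Int → List Int
  | 0, d, _, _ => d
  | fuel + 1, d, oi, ai =>
      if ai < (arr.length : Int) then
        match pvInnerA arr ss.toNat (d, oi, ai) with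
        | (d', oi', ai') => pvWhileA arr ss skip fuel d' oi' (ai' + skip)
      else d

def drop_dim (arr : List Int) (dims_in_arr : List Int) (all_dims : List Int) (dim_to_drop : Int) : List Int :=
  let v := (PySem.List.pyGet? all_dims dim_to_drop).getD 0
  let dropped := List.replicate (PySem.Int.floordiv (arr.length : Int) v).toNat 0
  let slice_size := pvSliceLoop all_dims dim_to_drop dims_in_arr.reverse 1
  let skip_size := slice_size * (v - 1)
  pvWhileA arr slice_size skip_size (arr.length + 2) dropped 0 skip_size

-- ===== PORT B =====

def drop_dim_alt (arr : List Int) (dims_in_arr : List Int) (all_dims : List Int) (dim_to_drop : Int) : List Int :=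
  let slice_size := pvSliceLoop all_dims dim_to_drop dims_in_arr.reverse 1
  let v := (PySem.List.pyGet? all_dims dim_to_drop).getD 0
  let skip_size := slice_size * (v - 1)
  let block := slice_size * v
  (PySem.List.pyRange 0 (PySem.Int.floordiv (arr.length : Int) v) 1).map
    (fun i => (PySem.List.pyGet? arr
        (PySem.Int.floordiv i slice_size * block + skip_size + PySem.Int.mod i slice_size)).getD 0)

-- ===== PRECONDITION & SPEC =====

-- Pre_ excludes malformed inputs on which A's dual-pointer walk raises, loops forever, or returns
-- zeros left over from its preallocated output that it never wrote (arr shorter than its block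
-- structure implies); B raises IndexError on the latter.
def Pre_drop_dim (arr : List Int) (dims_in_arr : List Int) (all_dims : List Int) (dim_to_drop : Int) : Prop :=
  let n : Int := arr.length
  let tail := dims_in_arr.reverse.takeWhile (fun d => !(d == dim_to_drop))
  let v := PySem.List.pyGetD all_dims dim_to_drop 0
  let ss := (tail.map (fun d => PySem.List.pyGetD all_dims d 1)).prod
  let skip := ss * (v - 1)
  (PySem.List.pyGet? all_dims dim_to_drop).isSome = true ∧
  (tail.all (fun d => (PySem.List.pyGet? all_dims d).isSome)) = true ∧
  v ≠ 0 ∧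
  (if PySem.Int.floordiv n v ≤ 0 then (n ≤ skip ∨ (ss < 0 ∧ 0 < skip))
   else (1 ≤ v ∧ 1 ≤ ss ∧ PySem.Int.mod n (ss * v) < v))

instance (arr : List Int) (dims_in_arr : List Int) (all_dims : List Int) (dim_to_drop : Int) : Decidable (Pre_drop_dim arr dims_in_arr all_dims dim_to_drop) := by unfold Pre_drop_dim; infer_instance

def pvWitness_drop_dim : List Int × List Int × List Int × Int := ([1, 2, 3, 4], [0, 1], [2, 2], 0)

def Spec_drop_dim (arr : List Int) (dims_in_arr : List Int) (all_dims : List Int) (dim_to_drop : Int) (out : List Int) : Prop := out = drop_dim_alt arr dims_in_arr all_dims dim_to_drop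
instance (arr : List Int) (dims_in_arr : List Int) (all_dims : List Int) (dim_to_drop : Int) (out : List Int) : Decidable (Spec_drop_dim arr dims_in_arr all_dims dim_to_drop out) := by unfold Spec_drop_dim; infer_instance

-- ===== CLAIM (what is proved, stated in full; the proofs are below) =====
def Claim_equal_drop_dim : Prop := ∀ (arr : List Int) (dims_in_arr : List Int) (all_dims : List Int) (dim_to_drop : Int), Dom_drop_dim arr dims_in_arr all_dims dim_to_drop → Pre_drop_dim arr dims_in_arr all_dims dim_to_drop → Spec_drop_dim arr dims_in_arr all_dims dim_to_drop (drop_dim arr dims_in_arr all_dims dim_to_drop)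

-- ===== LEMMAS AND PROOFS =====

-- the two formulations of slice_size agree: A's/B's break-loop vs Pre_'s takeWhile product
theorem pvSliceLoop_eq_prod (all_dims : List Int) (dd : Int) :
    ∀ (l : List Int) (acc : Int),
      pvSliceLoop all_dims dd l acc
        = acc * ((l.takeWhile (fun d => !(d == dd))).map (fun d => PySem.List.pyGetD all_dims d 1)).prod := by
  intro l
  induction l with
  | nil => intro acc; simp [pvSliceLoop]
  | cons di rest ih =>
      intro acc
      by_cases h : di = dd
      · simp [pvSliceLoop, h, List.takeWhile]
      · have hb : (!di == dd) = true := by simp [h]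
        simp only [pvSliceLoop, beq_iff_eq, if_neg h, ih, List.takeWhile, hb]
        simp [mul_assoc]

-- inner loop characterisation: c writes starting at output index p, array index q
theorem pvInnerA_spec (arr : List Int) :
    ∀ (c p q : Nat) (d : List Int), q + c ≤ arr.length → p + c ≤ d.length →
      ∃ d', pvInnerA arr c (d, (p : Int), (q : Int)) = (d', ((p + c : Nat) : Int), ((q + c : Nat) : Int))
        ∧ d'.length = d.length
        ∧ ∀ t : Nat, d'[t]? = if p ≤ t ∧ t < p + c then arr[q + (t - p)]? else d[t]? := by
  intro c
  induction c with
  | zero =>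
      intro p q d _ _
      exact ⟨d, by simp [pvInnerA], rfl, fun t => by simp⟩
  | succ c ih =>
      intro p q d hq hp
      have hqlt : q < arr.length := by omega
      have hget : PySem.List.pyGet? arr (q : Int) = some arr[q] := by
        simp [PySem.List.pyGet?_natCast, List.getElem?_eq_getElem hqlt]
      have hset : PySem.List.pySetD d (p : Int) arr[q] = d.set p arr[q] := by
        simp [PySem.List.pySetD_natCast]
      obtain ⟨d', hrec, hlen, hel⟩ :=
        ih (p + 1) (q + 1) (d.set p arr[q]) (by omega) (by simp; omega)
      refine ⟨d', ?_, by simpa using hlen, ?_⟩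
      · have : pvInnerA arr (c + 1) (d, (p : Int), (q : Int))
            = pvInnerA arr c (d.set p arr[q], ((p + 1 : Nat) : Int), ((q + 1 : Nat) : Int)) := by
          simp [pvInnerA, hget, hset]
        have e1 : p + 1 + c = p + (c + 1) := by omega
        have e2 : q + 1 + c = q + (c + 1) := by omega
        rw [this, hrec, e1, e2]
      · intro t
        rw [hel t]
        by_cases h1 : p + 1 ≤ t ∧ t < p + 1 + c
        · rw [if_pos h1, if_pos (by omega)]
          congr 1
          omega
        · rw [if_neg h1]
          by_cases h2 : p ≤ t ∧ t < p + (c + 1)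
          · have ht : t = p := by omega
            rw [if_pos h2, ht]
            rw [List.getElem?_set_self (by omega)]
            simp [List.getElem?_eq_getElem hqlt]
          · rw [if_neg h2, List.getElem?_set_ne (by omega)]

-- degenerate loop exits: arr_idx already past the end
theorem pvWhileA_exit (arr : List Int) (ss skip : Int) (fuel : Nat) (d : List Int) (oi ai : Int)
    (h : (arr.length : Int) ≤ ai) : pvWhileA arr ss skip (fuel + 1) d oi ai = d := by
  simp [pvWhileA, not_lt.mpr h]

-- outer loop characterisation in the exact-block case: arr.length = m * (s * w) + r, r < w
theorem pvWhileA_spec (arr : List Int) (s w m r : Nat) (hs : 1 ≤ s) (hw : 1 ≤ w)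
    (hn : arr.length = m * (s * w) + r) (hr : r < w) :
    ∀ (fuel k : Nat) (d : List Int), k ≤ m → m ≤ fuel + k → d.length = m * s →
      ∃ d', pvWhileA arr (s : Int) ((s * (w - 1) : Nat) : Int) fuel d ((k * s : Nat) : Int)
              ((k * (s * w) + s * (w - 1) : Nat) : Int) = d'
        ∧ d'.length = m * s
        ∧ ∀ t : Nat, d'[t]? = if k * s ≤ t ∧ t < m * s
            then arr[(t / s) * (s * w) + s * (w - 1) + t % s]? else d[t]? := by
  obtain ⟨w', rfl⟩ : ∃ w', w = w' + 1 := ⟨w - 1, by omega⟩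
  simp only [Nat.add_sub_cancel]
  intro fuel
  induction fuel with
  | zero =>
      intro k d hk hfk hlen
      have hkm : k = m := by omega
      subst hkm
      exact ⟨d, by simp [pvWhileA], hlen,
        fun t => by rw [if_neg (fun hc => absurd hc.2 (not_lt.mpr hc.1))]⟩
  | succ f ih =>
      intro k d hk hfk hlen
      by_cases hkm : k < m
      · -- one more full block is read and written
        have h1 : k * (s * (w' + 1)) + s * w' + s = (k + 1) * (s * (w' + 1)) := by ring
        have hstep : (k + 1) * (s * (w' + 1)) ≤ m * (s * (w' + 1)) :=
          Nat.mul_le_mul (by omega) (le_refl _)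
        have hle : k * (s * (w' + 1)) + s * w' + s ≤ m * (s * (w' + 1)) + r :=
          le_trans (h1 ▸ hstep) (Nat.le_add_right _ _)
        have haiN : k * (s * (w' + 1)) + s * w' < arr.length :=
          lt_of_lt_of_le (Nat.lt_add_of_pos_right hs) (by rw [hn]; exact hle)
        have hlt : ((k * (s * (w' + 1)) + s * w' : Nat) : Int) < (arr.length : Int) := by
          exact_mod_cast haiN
        have hq : k * (s * (w' + 1)) + s * w' + s ≤ arr.length := by
          rw [hn]; exact hle
        have hp : k * s + s ≤ d.length := by
          rw [hlen, ← Nat.succ_mul]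
          exact Nat.mul_le_mul (by omega) (le_refl _)
        obtain ⟨d1, hrec1, hlen1, hel1⟩ :=
          pvInnerA_spec arr s (k * s) (k * (s * (w' + 1)) + s * w') d hq hp
        have htn : ((s : Int)).toNat = s := Int.toNat_natCast s
        have hcast1 : ((k * s + s : Nat) : Int) = (((k + 1) * s : Nat) : Int) := by
          push_cast; ring
        have hcast2 : ((k * (s * (w' + 1)) + s * w' + s : Nat) : Int)
              + ((s * w' : Nat) : Int)
            = (((k + 1) * (s * (w' + 1)) + s * w' : Nat) : Int) := by
          push_cast; ring
        obtain ⟨d', hrec2, hlen2, hel2⟩ :=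
          ih (k + 1) d1 (by omega) (by omega) (hlen1.trans hlen)
        refine ⟨d', ?_, hlen2, ?_⟩
        · simp only [pvWhileA, if_pos hlt, htn, hrec1, hcast1, ← hcast2] at hrec2 ⊢
          exact hrec2
        · intro t
          rw [hel2 t]
          by_cases hc1 : (k + 1) * s ≤ t ∧ t < m * s
          · rw [if_pos hc1,
              if_pos ⟨le_trans (Nat.mul_le_mul (Nat.le_succ k) (le_refl s)) hc1.1, hc1.2⟩]
          · rw [if_neg hc1, hel1 t]
            by_cases hc2 : k * s ≤ t ∧ t < k * s + s
            · have hts : t < m * s := by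
                calc t < k * s + s := hc2.2
                  _ = (k + 1) * s := by ring
                  _ ≤ m * s := Nat.mul_le_mul (by omega) (le_refl _)
              rw [if_pos hc2, if_pos ⟨hc2.1, hts⟩]
              have hdiv : t / s = k :=
                Nat.div_eq_of_lt_le hc2.1 (by rw [Nat.succ_mul]; exact hc2.2)
              have h5 := Nat.mod_add_div t s
              rw [hdiv] at h5
              have hmod : t % s = t - s * k := Nat.eq_sub_of_add_eq h5
              rw [hdiv, hmod, mul_comm s k]
            · rw [if_neg hc2, if_neg (fun hc => by
                rcases Nat.lt_or_ge t (k * s + s) with h | h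
                · exact hc2 ⟨hc.1, h⟩
                · exact hc1 ⟨by rw [Nat.succ_mul]; exact h, hc.2⟩)]
      · -- k = m: the walk is already past the end of arr, the loop exits
        have hkm' : k = m := by omega
        subst hkm'
        have hrw : r ≤ s * w' := by
          have h6 : w' ≤ s * w' := Nat.le_mul_of_pos_left w' hs
          omega
        have hexitN : arr.length ≤ k * (s * (w' + 1)) + s * w' := by
          rw [hn]; exact Nat.add_le_add_left hrw _
        have hexit : (arr.length : Int) ≤ ((k * (s * (w' + 1)) + s * w' : Nat) : Int) := by
          exact_mod_cast hexitN
        refine ⟨d, ?_, hlen,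
          fun t => by rw [if_neg (fun hc => absurd hc.2 (not_lt.mpr hc.1))]⟩
        exact pvWhileA_exit arr _ _ f _ _ _ hexit

-- degenerate loop with a non-positive slice_size writes nothing (and exits within fuel)
theorem pvWhileA_empty (arr : List Int) (ss skip : Int) (hss : ss ≤ 0) :
    ∀ (fuel : Nat) (d : List Int) (oi ai : Int),
      (arr.length : Int) ≤ ai + (fuel : Int) * skip → pvWhileA arr ss skip fuel d oi ai = d := by
  intro fuel
  induction fuel with
  | zero => intro d oi ai _; simp [pvWhileA]
  | succ f ih =>
      intro d oi ai h
      by_cases hlt : ai < (arr.length : Int)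
      · have h0 : ss.toNat = 0 := Int.toNat_of_nonpos hss
        simp only [pvWhileA, if_pos hlt, h0, pvInnerA]
        refine ih d oi (ai + skip) ?_
        have : ((f : Int) + 1) * skip = (f : Int) * skip + skip := by ring
        push_cast at h
        linarith
      · simp [pvWhileA, hlt]

-- ===== VERDICT (by name: the statement is the Claim_ definition above) =====
theorem drop_dim_spec : Claim_equal_drop_dim := by
  intro arr dims alld dd _ hpre
  unfold Pre_drop_dim at hpre
  obtain ⟨h1, h2, hv0, h4⟩ := hpre
  simp only [Spec_drop_dim, drop_dim, drop_dim_alt]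
  rw [pvSliceLoop_eq_prod, one_mul]
  set n : Int := (arr.length : Int) with hn_def
  set tail := dims.reverse.takeWhile (fun d => !(d == dd)) with htail
  set v : Int := PySem.List.pyGetD alld dd 0 with hv_def
  set ss : Int := (tail.map (fun d => PySem.List.pyGetD alld d 1)).prod with hss_def
  have hvv : (PySem.List.pyGet? alld dd).getD 0 = v := rfl
  rw [hvv]
  by_cases hcase : PySem.Int.floordiv n v ≤ 0
  · -- degenerate: the output has no elements
    rw [if_pos hcase] at h4
    rw [PySem.List.pyRange_one_eq_nil hcase, List.map_nil,
        Int.toNat_of_nonpos hcase, List.replicate_zero]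
    rcases h4 with hskipN | ⟨hssneg, hskippos⟩
    · exact pvWhileA_exit arr ss _ (arr.length + 1) [] 0 _ hskipN
    · refine pvWhileA_empty arr ss (ss * (v - 1)) (le_of_lt hssneg) _ [] 0 _ ?_
      set skip := ss * (v - 1)
      have hN0 : (0 : Int) ≤ n := Int.natCast_nonneg _
      have key : (0 : Int) ≤ (n + 2) * (skip - 1) :=
        mul_nonneg (by linarith) (by linarith)
      push_cast
      nlinarith [key]
  · -- main case: arr splits into exact blocks
    rw [if_neg hcase] at h4
    obtain ⟨hv1, hss1, hmod⟩ := h4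
    set s := ss.toNat with hs_def
    set w := v.toNat with hw_def
    have hsEq : (s : Int) = ss := Int.toNat_of_nonneg (by omega)
    have hwEq : (w : Int) = v := Int.toNat_of_nonneg (by omega)
    have hs1 : 1 ≤ s := by omega
    have hw1 : 1 ≤ w := by omega
    have hsw0 : 0 < s * w := by positivity
    set N := arr.length with hN_def
    set m := N / (s * w) with hm_def
    set r := N % (s * w) with hr_def
    have hn' : N = m * (s * w) + r := by
      rw [hm_def, hr_def]
      rw [Nat.mul_comm]
      exact (Nat.div_add_mod N (s * w)).symm
    have hr : r < w := by
      have hcast : ss * v = ((s * w : Nat) : Int) := by push_cast [hsEq, hwEq]; ring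
      rw [hcast, hn_def, PySem.Int.mod_natCast, ← hwEq] at hmod
      exact_mod_cast hmod
    have hNw : N / w = m * s := by
      have e1 : N = r + w * (m * s) := by rw [hn']; ring
      rw [e1, Nat.add_mul_div_left _ _ (by omega), Nat.div_eq_of_lt hr, Nat.zero_add]
    have hfloor : PySem.Int.floordiv n v = ((m * s : Nat) : Int) := by
      rw [hn_def, ← hwEq, PySem.Int.floordiv_natCast, hNw]
    have hskipEq : ss * (v - 1) = ((s * (w - 1) : Nat) : Int) := by
      rw [← hsEq, ← hwEq]
      push_cast [hw1]
      ring
    have h7 : s * (w - 1) + s = s * w := by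
      rw [Nat.mul_sub, Nat.mul_one]
      exact Nat.sub_add_cancel (Nat.le_mul_of_pos_right s (by omega))
    have hmN : m * (s * w) ≤ N := by rw [hn']; exact Nat.le_add_right _ _
    have hfuel : m ≤ N + 2 + 0 := by
      have := le_trans (Nat.le_mul_of_pos_right m hsw0) hmN
      omega
    obtain ⟨dA, hrecA, hlenA, helA⟩ :=
      pvWhileA_spec arr s w m r hs1 hw1 hn' hr (N + 2) 0
        (List.replicate (m * s) 0) (Nat.zero_le m) hfuel (by simp)
    simp only [Nat.zero_mul, Nat.zero_add, Nat.cast_zero] at hrecA helA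
    rw [hfloor, hskipEq, Int.toNat_natCast, ← hsEq, ← hwEq, hrecA]
    -- compare element by element with B's closed-form map
    apply List.ext_getElem?
    intro t
    rw [helA t]
    by_cases ht : t < m * s
    · rw [if_pos ⟨Nat.zero_le t, ht⟩,
        PySem.List.getElem?_map_pyRange_zero _ (m * s) t ht]
      have hdt : t / s + 1 ≤ m := by
        have h9 : t < s * m := by rw [Nat.mul_comm]; exact ht
        exact Nat.div_lt_of_lt_mul h9
      have hKlt : (t / s) * (s * w) + s * (w - 1) + t % s < N := by
        calc (t / s) * (s * w) + s * (w - 1) + t % s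
            < (t / s) * (s * w) + (s * (w - 1) + s) := by
              have := Nat.mod_lt t (show 0 < s by omega)
              omega
          _ = (t / s + 1) * (s * w) := by rw [h7]; ring
          _ ≤ m * (s * w) := Nat.mul_le_mul hdt (le_refl _)
          _ ≤ N := hmN
      have hidx : PySem.Int.floordiv (t : Int) (s : Int) * ((s : Int) * (w : Int))
            + ((s * (w - 1) : Nat) : Int) + PySem.Int.mod (t : Int) (s : Int)
          = (((t / s) * (s * w) + s * (w - 1) + t % s : Nat) : Int) := by
        rw [PySem.Int.floordiv_natCast, PySem.Int.mod_natCast]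
        push_cast
        ring
      rw [hidx, PySem.List.pyGet?_natCast, List.getElem?_eq_getElem hKlt]
      simp
    · rw [if_neg (fun hc => ht hc.2)]
      rw [List.getElem?_eq_none (by simpa using (by omega : m * s ≤ t)),
          List.getElem?_eq_none (by
            simp only [List.length_map, PySem.List.length_pyRange_one]
            omega)]
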